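-- pv_equiv track=rewrite | github.com/tsukumijima/KonomiTV | server/app/utils/edcb/EDCBUtil.py | getLogoIDFromLogoDataIni
-- ===== SOURCE A (Python) =====
-- def getLogoIDFromLogoDataIni(logo_data_ini: str, network_id: int, service_id: int) -> int:
--     """ LogoData.ini をもとにロゴ識別を取得する。失敗のとき負値を返す """
--     target = f'{network_id:04X}{service_id:04X}'
--     for line in logo_data_ini.splitlines():
--         key_value = line.split('=', 1)
--         if len(key_value) == 2 and key_value[0].strip().upper() == target:
--             try:
--                 return int(key_value[1].strip())
--             except Exception:
--                 break
--     return -1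
-- ===== SOURCE B (Python) =====
-- def getLogoIDFromLogoDataIni(logo_data_ini: str, network_id: int, service_id: int) -> int:
--     """Index-then-lookup: build a first-occurrence-wins key table once, then look up the target."""
--     target = f'{network_id:04X}{service_id:04X}'
--     table = {}
--     for line in logo_data_ini.splitlines():
--         parts = line.split('=', 1)
--         if len(parts) == 2:
--             key = parts[0].strip().upper()
--             if key not in table:
--                 table[key] = parts[1].strip()
--     raw = table.get(target)
--     if raw is None:
--         return -1
--     try:
--         return int(raw)
--     except ValueError:
--         return -1
-- ===== Notes on version B (the rewrite author's own statement) =====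
-- stated objective: alternative
-- what changed: Replaces A's interleaved scan-with-early-return by a two-phase decomposition: one pass builds a first-occurrence-wins key/value table over all lines, then the answer is a single table lookup followed by int parsing.
import Mathlib
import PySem

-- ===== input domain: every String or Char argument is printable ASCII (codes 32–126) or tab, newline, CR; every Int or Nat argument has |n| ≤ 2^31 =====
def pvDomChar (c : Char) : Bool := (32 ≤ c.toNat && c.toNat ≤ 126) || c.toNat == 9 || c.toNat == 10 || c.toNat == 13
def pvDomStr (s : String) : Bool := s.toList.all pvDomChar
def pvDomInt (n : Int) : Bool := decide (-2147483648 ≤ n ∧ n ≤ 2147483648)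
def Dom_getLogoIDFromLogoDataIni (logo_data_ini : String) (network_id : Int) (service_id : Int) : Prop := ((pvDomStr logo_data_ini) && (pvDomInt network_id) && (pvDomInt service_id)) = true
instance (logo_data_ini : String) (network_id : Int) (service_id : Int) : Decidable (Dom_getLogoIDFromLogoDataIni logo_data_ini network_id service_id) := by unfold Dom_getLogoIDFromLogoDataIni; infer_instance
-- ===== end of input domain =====

-- B replaces A's interleaved scan-with-early-return by an index-then-lookup decomposition
-- (build a first-occurrence-wins key table in one pass, then a single lookup + int parse); same cost, alternative structure.

-- shared helper for the f-string target: f'{n:04X}' (uppercase hex, zero-padded to width 4, sign counts toward the width)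
def pvHexDigit (n : Nat) : Char :=
  (['0','1','2','3','4','5','6','7','8','9','A','B','C','D','E','F'].getD n '0')

def pvHexNat : Nat → List Char
  | 0 => []
  | (n+1) => pvHexNat ((n+1) / 16) ++ [pvHexDigit ((n+1) % 16)]
decreasing_by exact Nat.div_lt_self (Nat.succ_pos n) (by norm_num)

def pvHex4 (n : Int) : List Char :=
  let ds := if n = 0 then ['0'] else pvHexNat n.natAbs
  if n < 0 then '-' :: (List.replicate (3 - ds.length) '0' ++ ds)
  else List.replicate (4 - ds.length) '0' ++ ds

-- ===== PORT A =====
-- the 'for line in …: …' loop with early return / break, as structural recursion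
def goA (target : List Char) : List (List Char) → Int
  | [] => -1
  | line :: rest =>
    match PySem.Chars.splitOnMax line ['='] 1 with
    | [k, v] =>
      if PySem.Chars.upper (PySem.Chars.strip k) = target then
        match PySem.Int.ofChars? (PySem.Chars.strip v) with
        | some x => x          -- return int(...)
        | none => -1           -- except: break, then return -1
      else goA target rest
    | _ => goA target rest     -- len(key_value) ≠ 2

def getLogoIDFromLogoDataIni (logo_data_ini : String) (network_id : Int) (service_id : Int) : Int :=
  let target := pvHex4 network_id ++ pvHex4 service_id
  goA target (PySem.Chars.splitlines logo_data_ini.toList)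

-- ===== PORT B =====
-- one table-building step: insert key only if not already present (first occurrence wins)
def stepB (d : PySem.Dict (List Char) (List Char)) (line : List Char) : PySem.Dict (List Char) (List Char) :=
  match PySem.Chars.splitOnMax line ['='] 1 with
  | [k, v] =>
    let key := PySem.Chars.upper (PySem.Chars.strip k)
    if d.contains key then d else d.insert key (PySem.Chars.strip v)
  | _ => d

def getLogoIDFromLogoDataIni_alt (logo_data_ini : String) (network_id : Int) (service_id : Int) : Int :=
  let target := pvHex4 network_id ++ pvHex4 service_id
  let table := (PySem.Chars.splitlines logo_data_ini.toList).foldl stepB PySem.Dict.empty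
  match table.get? target with
  | none => -1
  | some raw =>
    match PySem.Int.ofChars? raw with
    | some x => x
    | none => -1

-- ===== PRECONDITION & SPEC =====
def Spec_getLogoIDFromLogoDataIni (logo_data_ini : String) (network_id : Int) (service_id : Int) (out : Int) : Prop := out = getLogoIDFromLogoDataIni_alt logo_data_ini network_id service_id
instance (logo_data_ini : String) (network_id : Int) (service_id : Int) (out : Int) : Decidable (Spec_getLogoIDFromLogoDataIni logo_data_ini network_id service_id out) := by unfold Spec_getLogoIDFromLogoDataIni; infer_instance

-- ===== CLAIM (what is proved, stated in full; the proofs are below) =====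
def Claim_equal_getLogoIDFromLogoDataIni : Prop := ∀ (logo_data_ini : String) (network_id : Int) (service_id : Int), Dom_getLogoIDFromLogoDataIni logo_data_ini network_id service_id → Spec_getLogoIDFromLogoDataIni logo_data_ini network_id service_id (getLogoIDFromLogoDataIni logo_data_ini network_id service_id)

-- ===== LEMMAS AND PROOFS =====

-- the value at the FIRST line whose key matches target (A's early-return order)
def findV (target : List Char) : List (List Char) → Option (List Char)
  | [] => none
  | line :: rest =>
    match PySem.Chars.splitOnMax line ['='] 1 with
    | [k, v] =>
      if PySem.Chars.upper (PySem.Chars.strip k) = target then some (PySem.Chars.strip v)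
      else findV target rest
    | _ => findV target rest

lemma get?_foldl_stepB (target : List Char) (lines : List (List Char))
    (d : PySem.Dict (List Char) (List Char)) :
    (lines.foldl stepB d).get? target = (d.get? target).or (findV target lines) := by
  induction lines generalizing d with
  | nil => simp [findV]
  | cons line rest ih =>
    simp only [List.foldl_cons, ih]
    cases h : PySem.Chars.splitOnMax line ['='] 1 with
    | nil => simp [stepB, findV, h]
    | cons k tl =>
      cases tl with
      | nil => simp [stepB, findV, h]
      | cons v tl2 =>
        cases tl2 with
        | cons _ _ => simp [stepB, findV, h]
        | nil =>
          simp only [stepB, findV, h]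
          by_cases hk : PySem.Chars.upper (PySem.Chars.strip k) = target
          · subst hk
            by_cases hc : d.contains (PySem.Chars.upper (PySem.Chars.strip k)) = true
            · have hs : (d.get? (PySem.Chars.upper (PySem.Chars.strip k))).isSome := by
                rw [← PySem.Dict.contains_eq_isSome_get?]; exact hc
              cases hg : d.get? (PySem.Chars.upper (PySem.Chars.strip k)) with
              | none => rw [hg] at hs; simp at hs
              | some w => simp [hc, hg]
            · simp only [Bool.not_eq_true] at hc
              have hg : d.get? (PySem.Chars.upper (PySem.Chars.strip k)) = none := by
                rw [PySem.Dict.get?_eq_none_iff_contains]; exact hc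
              simp [hc, hg, PySem.Dict.get?_insert_self]
          · have hne : target ≠ PySem.Chars.upper (PySem.Chars.strip k) := fun h2 => hk h2.symm
            by_cases hc : d.contains (PySem.Chars.upper (PySem.Chars.strip k)) = true
            · simp [hc, hk]
            · simp only [Bool.not_eq_true] at hc
              simp [hc, hk, PySem.Dict.get?_insert, hne]

lemma goA_eq_findV (target : List Char) (lines : List (List Char)) :
    goA target lines =
      (match findV target lines with
       | none => (-1 : Int)
       | some raw =>
         match PySem.Int.ofChars? raw with
         | some x => x
         | none => -1) := by
  induction lines with
  | nil => rfl
  | cons line rest ih =>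
    cases h : PySem.Chars.splitOnMax line ['='] 1 with
    | nil => simp [goA, findV, h, ih]
    | cons k tl =>
      cases tl with
      | nil => simp [goA, findV, h, ih]
      | cons v tl2 =>
        cases tl2 with
        | cons _ _ => simp [goA, findV, h, ih]
        | nil =>
          by_cases hk : PySem.Chars.upper (PySem.Chars.strip k) = target
          · simp [goA, findV, h, hk]
          · simp [goA, findV, h, hk, ih]

-- ===== VERDICT (by name: the statement is the Claim_ definition above) =====
theorem getLogoIDFromLogoDataIni_spec : Claim_equal_getLogoIDFromLogoDataIni := by
  intro s nid sid _
  unfold Spec_getLogoIDFromLogoDataIni getLogoIDFromLogoDataIni getLogoIDFromLogoDataIni_alt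
  simp only [get?_foldl_stepB, PySem.Dict.get?_empty, Option.none_or, goA_eq_findV]
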